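-- pv_equiv track=rewrite | github.com/Saumy05/vigyantra | python-service/scanners/privacy_scanner.py | _calculate_privacy_risk
-- ===== SOURCE A (Python) =====
-- from typing import Dict, List, Any
--
-- def _calculate_privacy_risk(issues: List[Dict[str, Any]]) -> str:
--     """Calculate overall privacy risk level"""
--     if any(issue['risk_level'] == 'high' for issue in issues):
--         return 'high'
--     elif any(issue['risk_level'] == 'medium' for issue in issues):
--         return 'medium'
--     elif issues:
--         return 'low'
--     else:
--         return 'none'
-- ===== SOURCE B (Python) =====
-- from typing import Dict, List, Any
--
-- def _calculate_privacy_risk(issues: List[Dict[str, Any]]) -> str: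
--     """Calculate overall privacy risk level (single pass)."""
--     saw_medium = False
--     for issue in issues:
--         val = issue['risk_level']
--         if val == 'high':
--             return 'high'
--         if val == 'medium':
--             saw_medium = True
--     if saw_medium:
--         return 'medium'
--     if issues:
--         return 'low'
--     return 'none'
-- ===== Notes on version B (the rewrite author's own statement) =====
-- stated objective: alternative
-- what changed: Replaces A's two sequential any()-scans over the issue list with a single loop that returns 'high' immediately and carries a saw_medium flag to decide afterwards.
import Mathlib
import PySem

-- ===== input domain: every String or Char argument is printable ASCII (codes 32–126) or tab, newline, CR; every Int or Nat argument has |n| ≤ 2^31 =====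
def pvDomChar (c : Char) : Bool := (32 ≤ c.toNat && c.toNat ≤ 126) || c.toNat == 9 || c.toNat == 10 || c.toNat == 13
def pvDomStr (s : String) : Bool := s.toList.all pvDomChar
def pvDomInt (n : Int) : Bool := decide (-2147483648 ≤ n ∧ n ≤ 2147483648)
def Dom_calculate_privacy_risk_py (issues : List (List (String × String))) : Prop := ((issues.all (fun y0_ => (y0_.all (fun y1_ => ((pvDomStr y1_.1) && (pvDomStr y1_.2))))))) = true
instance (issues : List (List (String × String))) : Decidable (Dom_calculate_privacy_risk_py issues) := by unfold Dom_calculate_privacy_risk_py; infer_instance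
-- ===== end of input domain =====

-- ===== PORT A =====
-- A: two any()-scans then presence checks. Dict lookup issue['risk_level'] is ported as
-- PySem.Dict.getD _ "risk_level" "": exact wherever A does not raise KeyError (Pre_ excludes KeyError inputs).
def calculate_privacy_risk_py (issues : List (List (String × String))) : String :=
  if issues.any (fun issue => PySem.Dict.getD (PySem.Dict.mk issue) "risk_level" "" == "high") then "high"
  else if issues.any (fun issue => PySem.Dict.getD (PySem.Dict.mk issue) "risk_level" "" == "medium") then "medium"
  else if issues ≠ [] then "low"
  else "none"

-- ===== PORT B =====
-- B: single loop; early return 'high' modelled by Sum.inl, final saw_medium by Sum.inr.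
def pvAltLoop : List (List (String × String)) → Bool → String ⊕ Bool
  | [], sawMedium => .inr sawMedium
  | issue :: rest, sawMedium =>
    let val := PySem.Dict.getD (PySem.Dict.mk issue) "risk_level" ""
    if val == "high" then .inl "high"
    else pvAltLoop rest (sawMedium || (val == "medium"))

def calculate_privacy_risk_py_alt (issues : List (List (String × String))) : String :=
  match pvAltLoop issues false with
  | .inl s => s
  | .inr sawMedium =>
    if sawMedium then "medium"
    else if issues ≠ [] then "low"
    else "none"

-- ===== PRECONDITION & SPEC =====
-- Pre_ excludes exactly the inputs on which Python A raises KeyError: an issue dict missing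
-- the 'risk_level' key occurring before any issue whose 'risk_level' is 'high'.
def Pre_calculate_privacy_risk_py (issues : List (List (String × String))) : Prop :=
  ∀ issue ∈ issues.takeWhile (fun issue => !(PySem.Dict.get? (PySem.Dict.mk issue) "risk_level" == some "high")),
    (PySem.Dict.get? (PySem.Dict.mk issue) "risk_level").isSome

instance (issues : List (List (String × String))) : Decidable (Pre_calculate_privacy_risk_py issues) := by
  unfold Pre_calculate_privacy_risk_py; infer_instance

def pvWitness_calculate_privacy_risk_py : (List (List (String × String))) :=
  [[("risk_level", "medium")], [("risk_level", "low")]]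

def Spec_calculate_privacy_risk_py (issues : List (List (String × String))) (out : String) : Prop := out = calculate_privacy_risk_py_alt issues
instance (issues : List (List (String × String))) (out : String) : Decidable (Spec_calculate_privacy_risk_py issues out) := by unfold Spec_calculate_privacy_risk_py; infer_instance

-- ===== CLAIM (what is proved, stated in full; the proofs are below) =====
def Claim_equal_calculate_privacy_risk_py : Prop := ∀ (issues : List (List (String × String))), Dom_calculate_privacy_risk_py issues → Pre_calculate_privacy_risk_py issues → Spec_calculate_privacy_risk_py issues (calculate_privacy_risk_py issues)

-- ===== LEMMAS AND PROOFS =====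
-- B's loop returns .inl "high" iff some issue is high, else .inr (saw || any medium).
theorem pvAltLoop_eq (issues : List (List (String × String))) (saw : Bool) :
    pvAltLoop issues saw =
      if issues.any (fun issue => PySem.Dict.getD (PySem.Dict.mk issue) "risk_level" "" == "high") then .inl "high"
      else .inr (saw || issues.any (fun issue => PySem.Dict.getD (PySem.Dict.mk issue) "risk_level" "" == "medium")) := by
  induction issues generalizing saw with
  | nil => simp [pvAltLoop]
  | cons d rest ih =>
    simp only [pvAltLoop, List.any_cons]
    by_cases h : (PySem.Dict.getD (PySem.Dict.mk d) "risk_level" "" == "high") = true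
    · simp [h]
    · simp only [Bool.not_eq_true] at h
      rw [ih]
      simp [h, Bool.or_assoc]

-- ===== VERDICT (by name: the statement is the Claim_ definition above) =====
theorem calculate_privacy_risk_py_spec : Claim_equal_calculate_privacy_risk_py := by
  intro issues _ _
  unfold Spec_calculate_privacy_risk_py calculate_privacy_risk_py calculate_privacy_risk_py_alt
  rw [pvAltLoop_eq]
  by_cases h : (issues.any (fun issue => PySem.Dict.getD (PySem.Dict.mk issue) "risk_level" "" == "high")) = true
  · simp [h]
  · simp only [Bool.not_eq_true] at h
    simp [h]
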